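-- pv_equiv track=rewrite | github.com/mggg/summer2023 | mcmc_ballot_generation/randomwalk.py | loop_erase
-- ===== SOURCE A (Python) =====
-- def loop_erase(walk):
--     result = []
--     ballot = []
--     for num in walk:
--         if num != 0:
--             if num in ballot:
--                 ballot = ballot[:ballot.index(num)]
--             ballot.append(num)
--         elif ballot:
--             result.append(ballot)
--             ballot = []
--
--     if ballot:  # In case the last element(s) are not followed by 0
--         result.append(ballot)
--
--     return ballots_to_profile(result)
--
-- def ballots_to_profile(ballots):
--     profile = {}
--     for ballot in ballots:
--         if tuple(ballot) not in profile:
--             profile[tuple(ballot)] = 0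
--         profile[tuple(ballot)] += 1
--
--     return profile
-- ===== SOURCE B (Python) =====
-- def loop_erase(walk):
--     profile = {}
--     for seg in _segments(walk):
--         key = _erased(seg)
--         profile[key] = profile.get(key, 0) + 1
--     return profile
--
-- def _segments(walk):
--     """Split the walk into its maximal runs of nonzero values."""
--     segs = []
--     cur = []
--     for num in walk:
--         if num != 0:
--             cur.append(num)
--         elif cur:
--             segs.append(cur)
--             cur = []
--     if cur:
--         segs.append(cur)
--     return segs
--
-- def _erased(seg):
--     """Loop-erase one segment by jumping to the last occurrence of each
--     kept value: the loop-erased path visits v, then continues right after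
--     v's last occurrence (chronological loop erasure gives the same path)."""
--     last = {}
--     for i, v in enumerate(seg):
--         last[v] = i
--     out = []
--     i = 0
--     while i < len(seg):
--         v = seg[i]
--         out.append(v)
--         i = last[v] + 1
--     return tuple(out)
-- ===== Notes on version B (the rewrite author's own statement) =====
-- stated objective: faster
-- what changed: B first splits the walk into maximal nonzero segments, then loop-erases each segment by a last-occurrence jump (precompute value->last-index dict, then hop i -> last[seg[i]]+1), instead of A's chronological list truncation with per-step membership/index scans; ballots are counted directly into the profile dict.
import Mathlib
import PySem

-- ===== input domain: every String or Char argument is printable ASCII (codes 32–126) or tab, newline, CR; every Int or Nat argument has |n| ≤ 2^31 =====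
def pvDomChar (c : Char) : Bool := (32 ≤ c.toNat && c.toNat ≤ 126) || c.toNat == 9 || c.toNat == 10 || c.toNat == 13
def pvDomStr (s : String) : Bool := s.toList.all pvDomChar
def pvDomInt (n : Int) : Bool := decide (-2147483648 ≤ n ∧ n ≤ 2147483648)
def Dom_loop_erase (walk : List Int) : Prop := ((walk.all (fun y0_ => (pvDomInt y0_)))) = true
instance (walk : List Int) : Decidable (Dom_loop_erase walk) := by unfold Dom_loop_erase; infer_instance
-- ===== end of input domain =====

-- B splits the walk into maximal nonzero segments and loop-erases each segment by jumping to
-- precomputed last occurrences, instead of A's chronological truncation with linear scans.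

-- ===== PORT A =====
-- ballots_to_profile: profile[t] = 0 if absent, then profile[t] += 1
def ballots_to_profile (ballots : List (List Int)) : PySem.Dict (List Int) Int :=
  ballots.foldl (fun profile ballot =>
    let profile := if profile.contains ballot then profile else profile.insert ballot 0
    profile.insert ballot (profile.getD ballot 0 + 1)) PySem.Dict.empty

-- one iteration of A's `for num in walk` over the state (result, ballot);
-- `ballot[:ballot.index(num)]` under the `num in ballot` guard: the index is `some i`
-- with 0 ≤ i ≤ len, so the slice is `take i` (the `.getD 0` default is never reached)
def stepA (st : List (List Int) × List Int) (num : Int) : List (List Int) × List Int :=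
  if num ≠ 0 then
    let ballot := if num ∈ st.2 then st.2.take ((PySem.List.index? st.2 num).getD 0) else st.2
    (st.1, ballot ++ [num])
  else if st.2 ≠ [] then (st.1 ++ [st.2], ([] : List Int))
  else st

def loop_erase (walk : List Int) : List (List Int × Int) :=
  let st := walk.foldl stepA ([], [])
  let result := if st.2 ≠ [] then st.1 ++ [st.2] else st.1
  (ballots_to_profile result).items

-- ===== PORT B =====
-- one iteration of _segments' loop over the state (segs, cur)
def segStep (st : List (List Int) × List Int) (num : Int) : List (List Int) × List Int :=
  if num ≠ 0 then (st.1, st.2 ++ [num])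
  else if st.2 ≠ [] then (st.1 ++ [st.2], ([] : List Int))
  else st

-- _segments: maximal runs of nonzero values
def pySegments (walk : List Int) : List (List Int) :=
  let st := walk.foldl segStep ([], [])
  if st.2 ≠ [] then st.1 ++ [st.2] else st.1

-- `for i, v in enumerate(seg): last[v] = i`
def lastDict (seg : List Int) : PySem.Dict Int Int :=
  (PySem.List.enumerate seg).foldl (fun d p => d.insert p.2 p.1) PySem.Dict.empty

-- the `while i < len(seg)` loop; fuel seg.length + 1 (i strictly increases each pass, so the
-- loop makes at most seg.length passes; Python's `last[v]` is `getD v 0` — never missing here)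
def erasedGo (seg : List Int) (last : PySem.Dict Int Int) (fuel i : Nat) : List Int :=
  match fuel with
  | 0 => []
  | f + 1 =>
    if h : i < seg.length then
      seg[i] :: erasedGo seg last f ((last.getD seg[i] 0).toNat + 1)
    else []

def erasedPort (seg : List Int) : List Int :=
  erasedGo seg (lastDict seg) (seg.length + 1) 0

-- profile[key] = profile.get(key, 0) + 1
def countStep (profile : PySem.Dict (List Int) Int) (key : List Int) : PySem.Dict (List Int) Int :=
  profile.insert key (profile.getD key 0 + 1)

def loop_erase_alt (walk : List Int) : List (List Int × Int) :=
  ((pySegments walk).foldl (fun profile seg => countStep profile (erasedPort seg))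
    PySem.Dict.empty).items

-- ===== PRECONDITION & SPEC =====
def Spec_loop_erase (walk : List Int) (out : List (List Int × Int)) : Prop := out = loop_erase_alt walk
instance (walk : List Int) (out : List (List Int × Int)) : Decidable (Spec_loop_erase walk out) := by unfold Spec_loop_erase; infer_instance

-- ===== CLAIM (what is proved, stated in full; the proofs are below) =====
def Claim_equal_loop_erase : Prop := ∀ (walk : List Int), Dom_loop_erase walk → Spec_loop_erase walk (loop_erase walk)

-- ===== LEMMAS AND PROOFS =====

-- A's ballot update for a nonzero num, as a standalone function
def bstep (b : List Int) (num : Int) : List Int :=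
  (if num ∈ b then b.take ((PySem.List.index? b num).getD 0) else b) ++ [num]

-- chronological loop erasure (what A's ballot is after a partial segment)
def chronE (l : List Int) : List Int := l.foldl bstep []

-- the suffix of t after the last occurrence of x (t itself if x ∉ t)
def dAL (x : Int) (t : List Int) : List Int := (t.reverse.takeWhile (fun a => a ≠ x)).reverse

-- index of the last occurrence of v in l
def lastIdx? (l : List Int) (v : Int) : Option Nat :=
  match l with
  | [] => none
  | a :: t =>
    match lastIdx? t v with
    | some j => some (j + 1)
    | none => if a = v then some 0 else none

theorem lastIdx?_nil (v : Int) : lastIdx? [] v = none := rfl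

theorem lastIdx?_cons (a : Int) (t : List Int) (v : Int) :
    lastIdx? (a :: t) v =
      (match lastIdx? t v with
       | some j => some (j + 1)
       | none => if a = v then some 0 else none) := rfl

theorem stepA_nonzero (st : List (List Int) × List Int) (num : Int) (h : num ≠ 0) :
    stepA st num = (st.1, bstep st.2 num) := by
  simp [stepA, bstep, h]

theorem foldl_bstep_ne_nil (l : List Int) (b : List Int) (hl : l ≠ []) :
    l.foldl bstep b ≠ [] := by
  obtain ⟨l', a, rfl⟩ := List.eq_nil_or_concat l |>.resolve_left hl
  rw [List.concat_eq_append, List.foldl_append]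
  simp [bstep]

theorem chronE_ne_nil (l : List Int) (hl : l ≠ []) : chronE l ≠ [] :=
  foldl_bstep_ne_nil l [] hl

theorem bstep_cons (x : Int) (b : List Int) (a : Int) :
    bstep (x :: b) a = if a = x then [x] else x :: bstep b a := by
  by_cases hax : a = x
  · subst hax
    rw [if_pos rfl, bstep, if_pos List.mem_cons_self, PySem.List.index?_cons_self]
    simp
  · rw [if_neg hax]
    by_cases hm : a ∈ b
    · obtain ⟨i, hi⟩ := Option.isSome_iff_exists.mp ((PySem.List.index?_isSome_iff b a).mpr hm)
      rw [bstep, bstep, if_pos (by simp [hm]), if_pos hm,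
        PySem.List.index?_cons_of_ne _ (fun h => hax h.symm), hi]
      simp [List.take_succ_cons]
    · rw [bstep, bstep, if_neg (by simp [hm, hax]), if_neg hm]
      simp

theorem foldl_bstep_cons_not_mem (x : Int) (t : List Int) (hx : x ∉ t) :
    ∀ b, t.foldl bstep (x :: b) = x :: t.foldl bstep b := by
  induction t with
  | nil => intro b; rfl
  | cons a r ih =>
    intro b
    have hax : a ≠ x := fun h => hx (h ▸ List.mem_cons_self)
    rw [List.foldl_cons, List.foldl_cons, bstep_cons, if_neg hax,
      ih (fun h => hx (List.mem_cons_of_mem a h))]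

theorem foldl_bstep_head (x : Int) (p : List Int) :
    ∀ b, ∃ b', p.foldl bstep (x :: b) = x :: b' := by
  induction p with
  | nil => intro b; exact ⟨b, rfl⟩
  | cons a r ih =>
    intro b
    rw [List.foldl_cons, bstep_cons]
    by_cases hax : a = x
    · rw [if_pos hax]; exact ih []
    · rw [if_neg hax]; exact ih _

theorem dAL_concat_self (x : Int) (t : List Int) : dAL x (t ++ [x]) = [] := by
  simp [dAL]

theorem dAL_concat_ne (x a : Int) (t : List Int) (h : a ≠ x) :
    dAL x (t ++ [a]) = dAL x t ++ [a] := by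
  simp [dAL, h]

theorem dAL_of_not_mem (x : Int) (t : List Int) (hx : x ∉ t) : dAL x t = t := by
  induction t using List.reverseRecOn with
  | nil => rfl
  | append_singleton t a ih =>
    have hax : a ≠ x := fun h => hx (h ▸ List.mem_append_right t List.mem_cons_self)
    rw [dAL_concat_ne x a t hax, ih (fun h => hx (List.mem_append_left [a] h))]

theorem dAL_append (x : Int) (p r : List Int) (hx : x ∉ r) :
    dAL x (p ++ x :: r) = r := by
  induction r using List.reverseRecOn with
  | nil => exact dAL_concat_self x p
  | append_singleton r a ih =>
    have hax : a ≠ x := fun h => hx (h ▸ List.mem_append_right r List.mem_cons_self)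
    have h1 : p ++ x :: (r ++ [a]) = (p ++ x :: r) ++ [a] := by simp
    rw [h1, dAL_concat_ne x a _ hax, ih (fun h => hx (List.mem_append_left [a] h))]

theorem dAL_decomp (x : Int) (t : List Int) (hm : x ∈ t) :
    ∃ p, t = p ++ x :: dAL x t ∧ x ∉ dAL x t := by
  induction t using List.reverseRecOn with
  | nil => cases hm
  | append_singleton t a ih =>
    by_cases hax : a = x
    · subst hax
      exact ⟨t, by rw [dAL_concat_self], by rw [dAL_concat_self]; exact List.not_mem_nil⟩
    · have hxt : x ∈ t := by
        rcases List.mem_append.mp hm with h | h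
        · exact h
        · exact absurd (List.mem_singleton.mp h).symm hax
      obtain ⟨p, hdec, hnm⟩ := ih hxt
      refine ⟨p, ?_, ?_⟩
      · rw [dAL_concat_ne x a t hax]
        conv_lhs => rw [hdec]
        simp
      · rw [dAL_concat_ne x a t hax]
        simp only [List.mem_append, List.mem_singleton]
        rintro (h | h)
        · exact hnm h
        · exact hax h.symm

theorem chronE_cons (x : Int) (t : List Int) :
    chronE (x :: t) = x :: chronE (dAL x t) := by
  have hb : bstep [] x = [x] := by simp [bstep]
  rw [chronE, List.foldl_cons, hb]
  by_cases hm : x ∈ t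
  · obtain ⟨p, hdec, hnm⟩ := dAL_decomp x t hm
    obtain ⟨b', hb'⟩ := foldl_bstep_head x p []
    have h3 : t.foldl bstep [x] = x :: (dAL x t).foldl bstep [] := by
      conv_lhs => rw [hdec]
      rw [List.foldl_append, List.foldl_cons, hb', bstep_cons, if_pos rfl,
        foldl_bstep_cons_not_mem x _ hnm]
    rw [h3]; rfl
  · rw [dAL_of_not_mem x t hm, foldl_bstep_cons_not_mem x t hm]
    rfl

theorem lastIdx?_eq_none_iff (l : List Int) (v : Int) :
    lastIdx? l v = none ↔ v ∉ l := by
  induction l with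
  | nil => simp [lastIdx?_nil]
  | cons a t ih =>
    rw [lastIdx?_cons]
    cases h : lastIdx? t v with
    | some j =>
      have hvt : v ∈ t := by
        by_contra hvt
        rw [ih.mpr hvt] at h
        cases h
      simp [List.mem_cons, hvt]
    | none =>
      have hvt : v ∉ t := ih.mp h
      by_cases hav : a = v
      · simp [hav]
      · rw [if_neg hav]
        simp only [List.mem_cons, not_or]
        constructor
        · intro _; exact ⟨fun h' => hav h'.symm, hvt⟩
        · intro _; trivial

theorem lastIdx?_spec (l : List Int) (v : Int) (k : Nat) (h : lastIdx? l v = some k) :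
    k < l.length ∧ l[k]? = some v ∧ v ∉ l.drop (k + 1) := by
  induction l generalizing k with
  | nil => cases h
  | cons a t ih =>
    rw [lastIdx?_cons] at h
    cases ht : lastIdx? t v with
    | some j =>
      rw [ht] at h
      obtain rfl : j + 1 = k := by injection h
      obtain ⟨h1, h2, h3⟩ := ih j ht
      exact ⟨by simpa using h1, by simpa using h2, by simpa using h3⟩
    | none =>
      rw [ht] at h
      by_cases hav : a = v
      · rw [if_pos hav] at h
        obtain rfl : (0 : Nat) = k := by injection h
        exact ⟨by simp, by simp [hav], by simpa using (lastIdx?_eq_none_iff t v).mp ht⟩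
      · rw [if_neg hav] at h
        cases h

theorem lastDict_fold_get? (l : List Int) (v : Int) :
    ∀ (d : PySem.Dict Int Int) (s : Int),
      ((PySem.List.enumerate l s).foldl (fun d p => d.insert p.2 p.1) d).get? v =
        (match lastIdx? l v with
         | some k => some (s + (k : Int))
         | none => d.get? v) := by
  induction l with
  | nil => intro d s; simp [PySem.List.enumerate_nil, lastIdx?_nil]
  | cons a t ih =>
    intro d s
    rw [PySem.List.enumerate_cons, List.foldl_cons, ih, lastIdx?_cons]
    cases ht : lastIdx? t v with
    | some j =>
      simp only [Option.some.injEq]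
      push_cast
      ring
    | none =>
      rw [PySem.Dict.get?_insert]
      by_cases hav : a = v
      · simp [hav]
      · rw [if_neg hav, if_neg (fun h => hav h.symm)]

theorem lastDict_get? (seg : List Int) (v : Int) :
    (lastDict seg).get? v =
      (match lastIdx? seg v with
       | some k => some ((k : Int))
       | none => none) := by
  rw [lastDict, lastDict_fold_get? seg v PySem.Dict.empty 0]
  cases lastIdx? seg v with
  | some k => simp
  | none => exact PySem.Dict.get?_empty v

theorem dAL_drop (seg : List Int) (i k : Nat) (hi : i < seg.length)
    (hik : i ≤ k) (hk : k < seg.length) (hkv : seg[k]? = some seg[i])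
    (hnm : seg[i] ∉ seg.drop (k + 1)) :
    dAL seg[i] (seg.drop (i + 1)) = seg.drop (k + 1) := by
  rcases Nat.eq_or_lt_of_le hik with rfl | hlt
  · exact dAL_of_not_mem _ _ hnm
  · have hkk : seg[k] = seg[i] := by
      have := List.getElem?_eq_getElem hk
      rw [this] at hkv; injection hkv
    have hdk : seg.drop k = seg[i] :: seg.drop (k + 1) := by
      rw [List.drop_eq_getElem_cons hk, hkk]
    have hsplit : seg.drop (i + 1) =
        (seg.drop (i + 1)).take (k - (i + 1)) ++ seg[i] :: seg.drop (k + 1) := by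
      conv_lhs => rw [← List.take_append_drop (k - (i + 1)) (seg.drop (i + 1))]
      rw [List.drop_drop]
      congr 1
      rw [show i + 1 + (k - (i + 1)) = k by omega, hdk]
    rw [hsplit, dAL_append _ _ _ hnm]

theorem erasedGo_eq (seg : List Int) :
    ∀ (fuel i : Nat), seg.length ≤ i + fuel →
      erasedGo seg (lastDict seg) fuel i = chronE (seg.drop i) := by
  intro fuel
  induction fuel with
  | zero =>
    intro i h
    rw [List.drop_eq_nil_of_le (by omega)]
    rfl
  | succ f ih =>
    intro i h
    rw [erasedGo]
    by_cases hi : i < seg.length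
    · rw [dif_pos hi]
      have hmem : seg[i] ∈ seg := List.getElem_mem hi
      obtain ⟨k, hk⟩ : ∃ k, lastIdx? seg seg[i] = some k := by
        cases hl : lastIdx? seg seg[i] with
        | some k => exact ⟨k, rfl⟩
        | none => exact absurd hmem ((lastIdx?_eq_none_iff seg seg[i]).mp hl)
      obtain ⟨hklt, hkv, hknm⟩ := lastIdx?_spec seg seg[i] k hk
      have hik : i ≤ k := by
        by_contra hc
        apply hknm
        have hlen : i - (k + 1) < (seg.drop (k + 1)).length := by
          rw [List.length_drop]; omega
        have hgd : (seg.drop (k + 1))[i - (k + 1)]'hlen = seg[i] := by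
          rw [List.getElem_drop]
          congr 1
          omega
        exact hgd ▸ List.getElem_mem hlen
      have hgd : (lastDict seg).getD seg[i] 0 = (k : Int) := by
        rw [PySem.Dict.getD_eq_get?_getD, lastDict_get?, hk]
        rfl
      rw [hgd]
      have htn : ((k : Int)).toNat + 1 = k + 1 := by omega
      rw [htn, ih (k + 1) (by omega), List.drop_eq_getElem_cons hi, chronE_cons,
        dAL_drop seg i k hi hik hklt hkv hknm]
    · rw [dif_neg hi, List.drop_eq_nil_of_le (by omega)]
      rfl

theorem erasedPort_eq (seg : List Int) : erasedPort seg = chronE seg := by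
  rw [erasedPort, erasedGo_eq seg (seg.length + 1) 0 (by omega)]
  rfl

-- A's fold simulates the segmentation fold through chronE
theorem fold_sim (walk : List Int) :
    ∀ (segs : List (List Int)) (cur : List Int),
      walk.foldl stepA (segs.map chronE, chronE cur) =
        ((walk.foldl segStep (segs, cur)).1.map chronE,
          chronE (walk.foldl segStep (segs, cur)).2) := by
  induction walk with
  | nil => intro segs cur; rfl
  | cons num rest ih =>
    intro segs cur
    rw [List.foldl_cons, List.foldl_cons]
    by_cases hz : num = 0
    · subst hz
      by_cases hc : cur ≠ []
      · have h1 : stepA (segs.map chronE, chronE cur) 0 =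
            ((segs ++ [cur]).map chronE, chronE []) := by
          rw [stepA]
          simp only [ne_eq, not_true_eq_false, if_false]
          rw [if_pos (by simpa using chronE_ne_nil cur hc)]
          simp [chronE]
        have h2 : segStep (segs, cur) 0 = (segs ++ [cur], []) := by
          rw [segStep]
          simp only [ne_eq, not_true_eq_false, if_false]
          rw [if_pos (by simpa using hc)]
        rw [h1, h2, ih]
      · rw [not_ne_iff] at hc
        subst hc
        have h1 : stepA (segs.map chronE, chronE []) 0 = (segs.map chronE, chronE []) := by
          rw [stepA]; simp [chronE]
        have h2 : segStep (segs, ([] : List Int)) 0 = (segs, []) := by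
          rw [segStep]; simp
        rw [h1, h2, ih]
    · have h1 : stepA (segs.map chronE, chronE cur) num =
          (segs.map chronE, chronE (cur ++ [num])) := by
        rw [stepA_nonzero _ _ hz]
        simp [chronE, List.foldl_append]
      have h2 : segStep (segs, cur) num = (segs, cur ++ [num]) := by
        rw [segStep, if_pos hz]
      rw [h1, h2, ih]

theorem fold_sim0 (walk : List Int) :
    walk.foldl stepA ([], []) =
      ((walk.foldl segStep ([], [])).1.map chronE,
        chronE (walk.foldl segStep ([], [])).2) := by
  have h := fold_sim walk [] []
  rw [List.map_nil] at h
  exact h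

theorem btp_eq_foldl (l : List (List Int)) :
    ballots_to_profile l = l.foldl countStep PySem.Dict.empty := by
  rw [ballots_to_profile]
  congr 1
  funext d b
  by_cases hc : d.contains b
  · simp only [if_pos hc]; rfl
  · rw [if_neg (show ¬(d.contains b = true) by simp [hc])]
    show (d.insert b 0).insert b ((d.insert b 0).getD b 0 + 1) = countStep d b
    rw [countStep, PySem.Dict.getD_insert_self, PySem.Dict.insert_insert_self,
      PySem.Dict.getD_of_not_contains d 0 (by simpa using hc)]

theorem alt_fold_eq (l : List (List Int)) :
    l.foldl (fun profile seg => countStep profile (erasedPort seg)) PySem.Dict.empty =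
      (l.map chronE).foldl countStep PySem.Dict.empty := by
  rw [List.foldl_map]
  congr 1
  funext p seg
  rw [erasedPort_eq]

-- ===== VERDICT (by name: the statement is the Claim_ definition above) =====
theorem loop_erase_spec : Claim_equal_loop_erase := by
  intro walk _
  unfold Spec_loop_erase
  rw [loop_erase, loop_erase_alt, fold_sim0, alt_fold_eq, btp_eq_foldl]
  set S := walk.foldl segStep ([], []) with hS
  have hresult :
      (if chronE S.2 ≠ [] then S.1.map chronE ++ [chronE S.2] else S.1.map chronE) =
        (pySegments walk).map chronE := by
    rw [pySegments, ← hS]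
    by_cases hc : S.2 ≠ []
    · rw [if_pos (by simpa using chronE_ne_nil S.2 hc), if_pos hc, List.map_append]
      rfl
    · rw [not_ne_iff] at hc
      rw [hc]
      simp [chronE]
  simp only [hresult]
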